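-- pv_equiv track=rewrite | github.com/bernikr/coding-contest | 38/src/level6.py | check_route_valid
-- ===== SOURCE A (Python) =====
-- from itertools import product, pairwise
--
-- def check_route_valid(level, route):
--     discovered_tiles = {route[0]}
--     discovered_diags = set()
--     for prev, cur in pairwise(route):
--         if cur in discovered_tiles:
--             return False
--         discovered_tiles.add(cur)
--         if cur + prev in discovered_diags:
--             return False
--         discovered_diags.add(cur + prev)
--     return True
-- ===== SOURCE B (Python) =====
-- def check_route_valid(level, route):
--     def has_dup(xs):
--         for i, x in enumerate(xs):
--             if x in xs[i + 1:]:
--                 return True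
--         return False
--
--     if has_dup(route):
--         return False
--     diags = [cur + prev for prev, cur in zip(route, route[1:])]
--     return not has_dup(diags)
-- ===== Notes on version B (the rewrite author's own statement) =====
-- stated objective: alternative
-- what changed: Drops A's hash sets entirely: B uses a quadratic brute-force duplicate scan (each element compared against the remaining suffix) run as two staged passes, first over the tiles, then over the fully built list of diagonal strings.
import Mathlib
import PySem

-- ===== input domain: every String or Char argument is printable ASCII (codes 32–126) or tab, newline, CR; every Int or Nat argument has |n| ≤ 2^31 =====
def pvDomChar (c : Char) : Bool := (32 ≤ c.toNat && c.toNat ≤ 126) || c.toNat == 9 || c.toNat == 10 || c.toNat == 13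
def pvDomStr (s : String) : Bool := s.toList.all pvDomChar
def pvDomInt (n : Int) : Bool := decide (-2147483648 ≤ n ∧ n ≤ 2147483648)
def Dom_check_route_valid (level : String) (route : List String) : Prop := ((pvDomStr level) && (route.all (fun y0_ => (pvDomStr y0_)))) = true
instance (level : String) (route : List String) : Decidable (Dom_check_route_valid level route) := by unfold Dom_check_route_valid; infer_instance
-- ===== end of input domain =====

-- B drops A's incremental hash sets: two staged quadratic brute-force duplicate scans
-- (each element vs the remaining suffix), first over tiles, then over the diagonal list;
-- objective: alternative (not faster).

-- ===== PORT A =====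
-- the loop 'for prev, cur in pairwise(route)': state = (discovered_tiles, discovered_diags, prev)
def checkRouteLoop (tiles : PySem.Set String) (diags : PySem.Set String)
    (prev : String) (rest : List String) : Bool :=
  match rest with
  | [] => true
  | cur :: rest' =>
    if tiles.contains cur then false
    else
      let tiles' := tiles.add cur
      if diags.contains (cur ++ prev) then false
      else checkRouteLoop tiles' (diags.add (cur ++ prev)) cur rest'

def check_route_valid (level : String) (route : List String) : Bool :=
  match route with
  | [] => false   -- route[0] raises IndexError in Python; excluded by Pre_check_route_valid
  | h :: t => checkRouteLoop (PySem.Set.add PySem.Set.empty h) PySem.Set.empty h t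

-- ===== PORT B =====
-- 'for i, x in enumerate(xs): if x in xs[i+1:]: return True' : each element vs its suffix
def hasDupScan (xs : List String) : Bool :=
  match xs with
  | [] => false
  | x :: rest => if rest.contains x then true else hasDupScan rest

def check_route_valid_alt (level : String) (route : List String) : Bool :=
  if hasDupScan route then false
  else
    let diags := (route.zip (route.drop 1)).map (fun pc => pc.2 ++ pc.1)
    !hasDupScan diags

-- ===== PRECONDITION & SPEC =====
-- Pre_ excludes exactly the empty route, on which A raises IndexError (route[0]).
def Pre_check_route_valid (level : String) (route : List String) : Prop := route ≠ []
instance (level : String) (route : List String) : Decidable (Pre_check_route_valid level route) := by unfold Pre_check_route_valid; infer_instance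
def pvWitness_check_route_valid : String × List String := ("lvl", ["a", "b", "c"])

def Spec_check_route_valid (level : String) (route : List String) (out : Bool) : Prop := out = check_route_valid_alt level route
instance (level : String) (route : List String) (out : Bool) : Decidable (Spec_check_route_valid level route out) := by unfold Spec_check_route_valid; infer_instance

-- ===== CLAIM (what is proved, stated in full; the proofs are below) =====
def Claim_equal_check_route_valid : Prop := ∀ (level : String) (route : List String), Dom_check_route_valid level route → Pre_check_route_valid level route → Spec_check_route_valid level route (check_route_valid level route)

-- ===== LEMMAS AND PROOFS =====

-- the list of diagonal strings of the chain prev :: rest, in order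
def diagsOf (prev : String) (rest : List String) : List String :=
  ((prev :: rest).zip rest).map (fun pc => pc.2 ++ pc.1)

theorem diagsOf_cons (prev cur : String) (rest : List String) :
    diagsOf prev (cur :: rest) = (cur ++ prev) :: diagsOf cur rest := by
  simp [diagsOf, List.zip]

theorem hasDupScan_eq_false_iff (xs : List String) :
    hasDupScan xs = false ↔ xs.Nodup := by
  induction xs with
  | nil => simp [hasDupScan]
  | cons x rest ih =>
    rw [List.nodup_cons, ← ih]
    by_cases h : x ∈ rest
    · simp [hasDupScan, h]
    · simp [hasDupScan, h]

-- characterisation of A's loop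
theorem checkRouteLoop_eq_true_iff (rest : List String)
    (tiles diags : PySem.Set String) (prev : String) :
    checkRouteLoop tiles diags prev rest = true ↔
      (rest.Nodup ∧ (∀ x ∈ rest, x ∉ tiles) ∧
       (diagsOf prev rest).Nodup ∧ (∀ d ∈ diagsOf prev rest, d ∉ diags)) := by
  induction rest generalizing tiles diags prev with
  | nil => simp [checkRouteLoop, diagsOf]
  | cons cur rest ih =>
    rw [diagsOf_cons]
    simp only [List.nodup_cons, List.forall_mem_cons]
    by_cases h1 : cur ∈ tiles
    · have hf : checkRouteLoop tiles diags prev (cur :: rest) = false := by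
        simp [checkRouteLoop, PySem.Set.contains, h1]
      rw [hf]
      refine iff_of_false (by simp) ?_
      rintro ⟨-, ⟨hcur, -⟩, -⟩; exact hcur h1
    · by_cases h2 : (cur ++ prev) ∈ diags
      · have hf : checkRouteLoop tiles diags prev (cur :: rest) = false := by
          simp [checkRouteLoop, PySem.Set.contains, h1, h2]
        rw [hf]
        refine iff_of_false (by simp) ?_
        rintro ⟨-, -, -, ⟨hd, -⟩⟩; exact hd h2
      · have hadd1 : PySem.Set.add tiles cur = tiles ++ [cur] := by
          simp [PySem.Set.add, PySem.Set.contains, h1]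
        have hadd2 : PySem.Set.add diags (cur ++ prev) = diags ++ [cur ++ prev] := by
          simp [PySem.Set.add, PySem.Set.contains, h2]
        have hstep : checkRouteLoop tiles diags prev (cur :: rest) =
            checkRouteLoop (tiles ++ [cur]) (diags ++ [cur ++ prev]) cur rest := by
          rw [show checkRouteLoop tiles diags prev (cur :: rest) =
              (if tiles.contains cur then false
               else if diags.contains (cur ++ prev) then false
               else checkRouteLoop (tiles.add cur) (diags.add (cur ++ prev)) cur rest) from rfl]
          rw [if_neg (by simp [PySem.Set.contains, h1]), if_neg (by simp [PySem.Set.contains, h2]), hadd1, hadd2]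
        rw [hstep, ih]
        simp only [List.mem_append, List.mem_singleton, not_or]
        constructor
        · rintro ⟨hnd, htl, hdnd, hdl⟩
          exact ⟨⟨fun hm => (htl cur hm).2 rfl, hnd⟩, ⟨h1, fun x hx => (htl x hx).1⟩,
                 ⟨fun hm => (hdl _ hm).2 rfl, hdnd⟩, ⟨h2, fun d hd => (hdl d hd).1⟩⟩
        · rintro ⟨⟨hc, hnd⟩, ⟨-, htl⟩, ⟨hdc, hdnd⟩, ⟨-, hdl⟩⟩
          exact ⟨hnd, fun x hx => ⟨htl x hx, fun e => hc (e ▸ hx)⟩,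
                 hdnd, fun d hd => ⟨hdl d hd, fun e => hdc (e ▸ hd)⟩⟩

theorem alt_eq_true_iff (level : String) (route : List String) :
    check_route_valid_alt level route = true ↔
      (route.Nodup ∧ ((route.zip (route.drop 1)).map (fun pc => pc.2 ++ pc.1)).Nodup) := by
  unfold check_route_valid_alt
  by_cases hr : route.Nodup
  · rw [if_neg (by simp [(hasDupScan_eq_false_iff route).2 hr])]
    simp only [Bool.not_eq_eq_eq_not, Bool.not_true, hr, true_and]
    exact hasDupScan_eq_false_iff _
  · have ht : hasDupScan route = true := by
      rcases Bool.eq_false_or_eq_true (hasDupScan route) with h | h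
      · exact h
      · exact absurd ((hasDupScan_eq_false_iff route).1 h) hr
    rw [if_pos ht]
    exact iff_of_false (by simp) (fun h => hr h.1)

-- ===== VERDICT (by name: the statement is the Claim_ definition above) =====
theorem check_route_valid_spec : Claim_equal_check_route_valid := by
  intro level route _ hpre
  unfold Spec_check_route_valid
  obtain _ | ⟨h, t⟩ := route
  · exact absurd rfl hpre
  · have hset : (PySem.Set.add PySem.Set.empty h : PySem.Set String) = [h] := by
      simp [PySem.Set.add, PySem.Set.empty, PySem.Set.contains]
    have hA := checkRouteLoop_eq_true_iff t [h] PySem.Set.empty h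
    have hB := alt_eq_true_iff level (h :: t)
    have hzip : ((h :: t).zip ((h :: t).drop 1)).map (fun pc => pc.2 ++ pc.1) = diagsOf h t := by
      simp [diagsOf]
    rw [hzip] at hB
    have hAdef : check_route_valid level (h :: t) = checkRouteLoop [h] PySem.Set.empty h t := by
      rw [show check_route_valid level (h :: t) =
          checkRouteLoop (PySem.Set.add PySem.Set.empty h) PySem.Set.empty h t from rfl, hset]
    have hiff : check_route_valid level (h :: t) = true ↔
        check_route_valid_alt level (h :: t) = true := by
      rw [hAdef, hA, hB]
      constructor
      · rintro ⟨hnd, htl, hdnd, -⟩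
        refine ⟨List.nodup_cons.mpr ⟨fun hm => ?_, hnd⟩, hdnd⟩
        exact (by simpa using htl h hm : ¬ h = h) rfl
      · rintro ⟨hcons, hdnd⟩
        rw [List.nodup_cons] at hcons
        refine ⟨hcons.2, fun x hx => ?_, hdnd, by simp [PySem.Set.empty]⟩
        simp only [List.mem_singleton]
        rintro rfl; exact hcons.1 hx
    by_cases hA' : check_route_valid level (h :: t) = true
    · rw [hA', hiff.1 hA']
    · have hB' : ¬ check_route_valid_alt level (h :: t) = true := fun hb => hA' (hiff.2 hb)
      rw [Bool.not_eq_true] at hA' hB'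
      rw [hA', hB']
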